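-- pv_equiv track=rewrite | github.com/bg668/knowledgeag | src/knowledgeag_card/ingestion/evidence_aligner.py | _normalize_with_offsets
-- ===== SOURCE A (Python) =====
-- def _normalize_with_offsets(text: str) -> tuple[str, list[int]]:
--     chars: list[str] = []
--     offsets: list[int] = []
--     in_space = False
--     for index, char in enumerate(text):
--         if char.isspace():
--             if chars and not in_space:
--                 chars.append(' ')
--                 offsets.append(index)
--             in_space = True
--             continue
--         chars.append(char.lower())
--         offsets.append(index)
--         in_space = False
--     if chars and chars[-1] == ' ':
--         chars.pop()
--         offsets.pop()
--     return ''.join(chars), offsets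
-- ===== SOURCE B (Python) =====
-- def _normalize_with_offsets(text: str) -> tuple[str, list[int]]:
--     # Phase 1: collect maximal non-space runs ("words") with their start indices.
--     words: list[tuple[int, str]] = []
--     i, n = 0, len(text)
--     while i < n:
--         if text[i].isspace():
--             i += 1
--             continue
--         j = i
--         while j < n and not text[j].isspace():
--             j += 1
--         words.append((i, text[i:j]))
--         i = j
--     # Phase 2: join lowered words with single spaces placed at each word's end index.
--     parts: list[str] = []
--     offsets: list[int] = []
--     prev_end = None
--     for start, word in words:
--         if prev_end is not None:
--             parts.append(' ')
--             offsets.append(prev_end)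
--         parts.append(word.lower())
--         offsets.extend(range(start, start + len(word)))
--         prev_end = start + len(word)
--     return ''.join(parts), offsets
-- ===== Notes on version B (the rewrite author's own statement) =====
-- stated objective: alternative
-- what changed: A's single char-by-char state machine (chars/offsets/in_space flag plus a trailing-space trim) is replaced by a two-phase decomposition: first scan maximal non-space words with their start indices, then join the lowered words with single spaces placed at each word's end offset, so no in_space flag and no trailing trim are needed.
import Mathlib
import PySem

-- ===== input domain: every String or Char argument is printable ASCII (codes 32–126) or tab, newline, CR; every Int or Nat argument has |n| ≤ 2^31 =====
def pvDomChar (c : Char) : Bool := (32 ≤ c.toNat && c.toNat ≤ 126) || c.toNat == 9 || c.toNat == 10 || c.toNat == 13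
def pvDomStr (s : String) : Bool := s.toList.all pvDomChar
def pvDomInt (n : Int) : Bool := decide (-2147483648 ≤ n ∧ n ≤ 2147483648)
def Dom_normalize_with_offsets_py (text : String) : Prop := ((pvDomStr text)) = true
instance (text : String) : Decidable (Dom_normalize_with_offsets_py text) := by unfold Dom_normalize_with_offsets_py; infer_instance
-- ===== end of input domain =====

-- B re-decomposes A's char-by-char state machine into two phases (scan words with start offsets, then join
-- lowered words with single spaces at word-end offsets); same cost, objective: alternative decomposition.

-- ===== PORT A =====
-- state = (chars, offsets, in_space); one fold step per (index, char) of enumerate(text)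
def stepA (st : List Char × List Int × Bool) (p : Int × Char) : List Char × List Int × Bool :=
  if PySem.Chars.isspace p.2 then
    if st.1 ≠ [] ∧ st.2.2 = false then (st.1 ++ [' '], st.2.1 ++ [p.1], true)
    else (st.1, st.2.1, true)
  else (st.1 ++ [PySem.Chars.lowerChar p.2], st.2.1 ++ [p.1], false)

def normalize_with_offsets_py (text : String) : String × List Int :=
  let st := (PySem.List.enumerate text.toList 0).foldl stepA ([], [], false)
  if st.1 ≠ [] ∧ st.1.getLast? = some ' ' then (String.ofList st.1.dropLast, st.2.1.dropLast)
  else (String.ofList st.1, st.2.1)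

-- ===== PORT B =====
-- phase 1 of Source B: maximal non-space runs with their start indices (the two nested whiles)
def wordsOfB : List Char → Int → List (Int × List Char)
  | [], _ => []
  | c :: rest, i =>
    if PySem.Chars.isspace c then wordsOfB rest (i + 1)
    else
      let w := c :: rest.takeWhile (fun d => !PySem.Chars.isspace d)
      (i, w) :: wordsOfB (rest.dropWhile (fun d => !PySem.Chars.isspace d)) (i + (w.length : Int))
termination_by l _ => l.length
decreasing_by
  · simp
  · have := List.length_dropWhile_le (fun d => !PySem.Chars.isspace d) rest
    simp; omega

-- phase 2 of Source B: fold over the words, state = (parts, offsets, prev_end)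
def stepB (st : List Char × List Int × Option Int) (p : Int × List Char) : List Char × List Int × Option Int :=
  let st' := match st.2.2 with
    | some e => (st.1 ++ [' '], st.2.1 ++ [e])
    | none => (st.1, st.2.1)
  (st'.1 ++ p.2.map PySem.Chars.lowerChar,
   st'.2 ++ PySem.List.pyRange p.1 (p.1 + (p.2.length : Int)) 1,
   some (p.1 + (p.2.length : Int)))

def normalize_with_offsets_py_alt (text : String) : String × List Int :=
  let st := (wordsOfB text.toList 0).foldl stepB ([], [], none)
  (String.ofList st.1, st.2.1)

-- ===== PRECONDITION & SPEC =====
def Spec_normalize_with_offsets_py (text : String) (out : String × List Int) : Prop := out = normalize_with_offsets_py_alt text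
instance (text : String) (out : String × List Int) : Decidable (Spec_normalize_with_offsets_py text out) := by unfold Spec_normalize_with_offsets_py; infer_instance

-- ===== CLAIM (what is proved, stated in full; the proofs are below) =====
def Claim_equal_normalize_with_offsets_py : Prop := ∀ (text : String), Dom_normalize_with_offsets_py text → Spec_normalize_with_offsets_py text (normalize_with_offsets_py text)

-- ===== LEMMAS AND PROOFS =====

-- A's loop from an arbitrary state, and A's trailing trim, as named functions
def foldA (l : List Char) (i : Int) (st : List Char × List Int × Bool) : List Char × List Int × Bool :=
  (PySem.List.enumerate l i).foldl stepA st

def finishA (st : List Char × List Int × Bool) : String × List Int :=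
  if st.1 ≠ [] ∧ st.1.getLast? = some ' ' then (String.ofList st.1.dropLast, st.2.1.dropLast)
  else (String.ofList st.1, st.2.1)

def outB (ws : List (Int × List Char)) (st : List Char × List Int × Option Int) : String × List Int :=
  let r := ws.foldl stepB st
  (String.ofList r.1, r.2.1)

theorem foldA_cons (c : Char) (rest : List Char) (i : Int) (st : List Char × List Int × Bool) :
    foldA (c :: rest) i st = foldA rest (i + 1) (stepA st (i, c)) := by
  simp [foldA, PySem.List.enumerate_cons]

theorem head?_dropWhile_false {p : Char → Bool} {l : List Char} {c : Char}
    (h : (l.dropWhile p).head? = some c) : p c = false := by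
  induction l with
  | nil => simp at h
  | cons a t ih =>
    rw [List.dropWhile_cons] at h
    split at h
    · exact ih h
    · simp_all

theorem lowerChar_ne_space (c : Char) (h : PySem.Chars.isspace c = false) :
    PySem.Chars.lowerChar c ≠ ' ' := by
  unfold PySem.Chars.lowerChar
  split
  · next hu =>
    have h1 : ('A' : Char) ≤ c ∧ c ≤ 'Z' := by simpa [PySem.Chars.isupper] using hu
    have h2 : 65 ≤ c.toNat ∧ c.toNat ≤ 90 := by
      obtain ⟨a, b⟩ := h1
      rw [Char.le_def] at a b
      exact ⟨a, b⟩
    intro heq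
    have h3 := congrArg Char.toNat heq
    rw [Char.toNat_ofNat] at h3
    have hv : (c.toNat + 32).isValidChar := Or.inl (by omega)
    simp [hv] at h3
    have hsp : (' ' : Char).toNat = 32 := rfl
    omega
  · intro heq
    subst heq
    simp [PySem.Chars.isspace] at h

-- A run of non-space characters is appended lowered, with consecutive offsets
theorem runA (w : List Char) (hw : ∀ c ∈ w, PySem.Chars.isspace c = false) :
    ∀ (rest : List Char) (i : Int) (cs : List Char) (offs : List Int),
    foldA (w ++ rest) i (cs, offs, false) =
      foldA rest (i + (w.length : Int))
        (cs ++ w.map PySem.Chars.lowerChar,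
         offs ++ PySem.List.pyRange i (i + (w.length : Int)) 1, false) := by
  induction w with
  | nil => intro rest i cs offs; simp [PySem.List.pyRange_one_eq_nil]
  | cons a w' ih =>
    intro rest i cs offs
    have ha : PySem.Chars.isspace a = false := hw a (by simp)
    rw [List.cons_append, foldA_cons]
    simp only [stepA, ha, Bool.false_eq_true, if_false]
    rw [ih (fun c hc => hw c (by simp [hc]))]
    have hlt : i < i + ((a :: w').length : Int) := by simp only [List.length_cons]; push_cast; omega
    rw [PySem.List.pyRange_one_cons hlt]
    have harith : i + 1 + (w'.length : Int) = i + ((a :: w').length : Int) := by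
      simp; omega
    rw [harith]
    simp [List.append_assoc]

def T2stmt (l : List Char) : Prop :=
  ∀ (i : Int) (cs : List Char) (offs : List Int),
    cs ≠ [] → cs.getLast? ≠ some ' ' →
    (∀ c ∈ l.head?, PySem.Chars.isspace c = true) →
    finishA (foldA l i (cs, offs, false)) = outB (wordsOfB l i) (cs, offs, some i)

def T3stmt (l : List Char) : Prop :=
  ∀ (i : Int) (cs : List Char) (offs : List Int) (e : Int),
    finishA (foldA l i (cs ++ [' '], offs ++ [e], true)) = outB (wordsOfB l i) (cs, offs, some e)

theorem T2_nil : T2stmt [] := by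
  intro i cs offs hne hlast _
  simp [foldA, PySem.List.enumerate, wordsOfB, outB, finishA, hne, hlast]

theorem T3_nil : T3stmt [] := by
  intro i cs offs e
  simp [foldA, PySem.List.enumerate, wordsOfB, outB, finishA]

theorem T23 : ∀ (n : Nat) (l : List Char), l.length ≤ n → T2stmt l ∧ T3stmt l := by
  intro n
  induction n with
  | zero =>
    intro l hl
    have : l = [] := List.eq_nil_of_length_eq_zero (Nat.le_zero.mp hl)
    subst this
    exact ⟨T2_nil, T3_nil⟩
  | succ n ih =>
    intro l hl
    cases l with
    | nil => exact ⟨T2_nil, T3_nil⟩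
    | cons c rest =>
      have hrest : rest.length ≤ n := by simpa using hl
      constructor
      · -- T2: state after a word (last char not ' '); head of l is a space
        intro i cs offs hne hlast hhd
        have hc : PySem.Chars.isspace c = true := hhd c (by simp)
        rw [foldA_cons]
        simp only [stepA, hc, if_true, hne, ne_eq, not_false_eq_true, true_and]
        rw [(ih rest hrest).2 (i + 1) cs offs i]
        simp [wordsOfB, hc]
      · -- T3: a pending collapsed space ' ' at offset e sits at the end of the output
        intro i cs offs e
        cases hc : PySem.Chars.isspace c with
        | true =>
          rw [foldA_cons]
          simp only [stepA, hc, if_true]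
          rw [if_neg (by simp)]
          rw [(ih rest hrest).2 (i + 1) cs offs e]
          simp [wordsOfB, hc]
        | false =>
          rw [foldA_cons]
          simp only [stepA, hc, Bool.false_eq_true, if_false]
          -- the word is c :: tw ; the remainder dw starts with a space (or is empty)
          set p : Char → Bool := fun d => !PySem.Chars.isspace d with hp
          set tw := rest.takeWhile p with htw
          set dw := rest.dropWhile p with hdw
          have hsplit : tw ++ dw = rest := List.takeWhile_append_dropWhile
          have htwns : ∀ d ∈ tw, PySem.Chars.isspace d = false := by
            intro d hd
            have := List.mem_takeWhile_imp hd
            simpa [hp] using this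
          rw [show rest = tw ++ dw from hsplit.symm,
              runA tw htwns dw (i + 1) (cs ++ [' '] ++ [PySem.Chars.lowerChar c]) (offs ++ [e] ++ [i])]
          -- apply T2 to dw
          have hne2 : cs ++ [' '] ++ [PySem.Chars.lowerChar c] ++ tw.map PySem.Chars.lowerChar ≠ [] := by
            simp
          have hlast2 :
              (cs ++ [' '] ++ [PySem.Chars.lowerChar c] ++ tw.map PySem.Chars.lowerChar).getLast? ≠ some ' ' := by
            rw [show cs ++ [' '] ++ [PySem.Chars.lowerChar c] ++ tw.map PySem.Chars.lowerChar
                  = (cs ++ [' ']) ++ (c :: tw).map PySem.Chars.lowerChar by simp]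
            rw [List.getLast?_append]
            rw [List.getLast?_map]
            obtain ⟨x, hx⟩ : ∃ x, (c :: tw).getLast? = some x := Option.isSome_iff_exists.mp (by simp [List.getLast?_isSome] : (c :: tw).getLast?.isSome)
            have hxm : x ∈ c :: tw := List.mem_of_getLast? hx
            have hxs : PySem.Chars.isspace x = false := by
              rcases List.mem_cons.mp hxm with h | h
              · exact h ▸ hc
              · exact htwns x h
            rw [hx]
            simp only [Option.map_some]
            intro habs
            exact lowerChar_ne_space x hxs (by injection habs)
          have hhd2 : ∀ c' ∈ dw.head?, PySem.Chars.isspace c' = true := by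
            intro c' hc'
            have := head?_dropWhile_false (p := p) (l := rest) (by rw [← hdw]; simpa using hc')
            simpa [hp] using this
          have hdwlen : dw.length ≤ n := le_trans (by rw [hdw]; exact List.length_dropWhile_le p rest) hrest
          rw [(ih dw hdwlen).1 (i + 1 + (tw.length : Int)) _ _ hne2 hlast2 hhd2]
          -- now compare with B's side on the word (i, c :: tw)
          rw [show wordsOfB (c :: (tw ++ dw)) i
                = (i, c :: tw) :: wordsOfB dw (i + ((c :: tw).length : Int)) by
              rw [wordsOfB]
              simp [hc, htw, hdw, hp, List.takeWhile_append_dropWhile]]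
          show _ = outB _ ((stepB (cs, offs, some e) (i, c :: tw)))
          simp only [stepB]
          have hlt : i < i + (((c :: tw).length : Nat) : Int) := by simp only [List.length_cons]; push_cast; omega
          rw [PySem.List.pyRange_one_cons hlt]
          have harith : i + 1 + (tw.length : Int) = i + ((c :: tw).length : Int) := by simp only [List.length_cons]; push_cast; omega
          rw [harith]
          simp [List.append_assoc]

theorem Tinit : ∀ (n : Nat) (l : List Char), l.length ≤ n → ∀ (i : Int) (b : Bool),
    finishA (foldA l i ([], [], b)) = outB (wordsOfB l i) ([], [], none) := by
  intro n
  induction n with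
  | zero =>
    intro l hl i b
    have : l = [] := List.eq_nil_of_length_eq_zero (Nat.le_zero.mp hl)
    subst this
    simp [foldA, PySem.List.enumerate, wordsOfB, outB, finishA]
  | succ n ih =>
    intro l hl i b
    cases l with
    | nil => simp [foldA, PySem.List.enumerate, wordsOfB, outB, finishA]
    | cons c rest =>
      have hrest : rest.length ≤ n := by simpa using hl
      cases hc : PySem.Chars.isspace c with
      | true =>
        rw [foldA_cons]
        simp only [stepA, hc, if_true]
        rw [if_neg (by simp)]
        rw [ih rest hrest (i + 1) true]
        simp [wordsOfB, hc]
      | false =>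
        rw [foldA_cons]
        simp only [stepA, hc, Bool.false_eq_true, if_false]
        set p : Char → Bool := fun d => !PySem.Chars.isspace d with hp
        set tw := rest.takeWhile p with htw
        set dw := rest.dropWhile p with hdw
        have hsplit : tw ++ dw = rest := List.takeWhile_append_dropWhile
        have htwns : ∀ d ∈ tw, PySem.Chars.isspace d = false := by
          intro d hd
          have := List.mem_takeWhile_imp hd
          simpa [hp] using this
        rw [show rest = tw ++ dw from hsplit.symm,
            runA tw htwns dw (i + 1) ([] ++ [PySem.Chars.lowerChar c]) ([] ++ [i])]
        have hne2 : [] ++ [PySem.Chars.lowerChar c] ++ tw.map PySem.Chars.lowerChar ≠ [] := by simp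
        have hlast2 :
            ([] ++ [PySem.Chars.lowerChar c] ++ tw.map PySem.Chars.lowerChar).getLast? ≠ some ' ' := by
          rw [show ([] : List Char) ++ [PySem.Chars.lowerChar c] ++ tw.map PySem.Chars.lowerChar
                = ([] : List Char) ++ (c :: tw).map PySem.Chars.lowerChar by simp]
          rw [List.getLast?_append]
          rw [List.getLast?_map]
          obtain ⟨x, hx⟩ : ∃ x, (c :: tw).getLast? = some x := Option.isSome_iff_exists.mp (by simp [List.getLast?_isSome] : (c :: tw).getLast?.isSome)
          have hxm : x ∈ c :: tw := List.mem_of_getLast? hx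
          have hxs : PySem.Chars.isspace x = false := by
            rcases List.mem_cons.mp hxm with h | h
            · exact h ▸ hc
            · exact htwns x h
          rw [hx]
          simp only [Option.map_some]
          intro habs
          exact lowerChar_ne_space x hxs (by injection habs)
        have hhd2 : ∀ c' ∈ dw.head?, PySem.Chars.isspace c' = true := by
          intro c' hc'
          have := head?_dropWhile_false (p := p) (l := rest) (by rw [← hdw]; simpa using hc')
          simpa [hp] using this
        have hdwlen : dw.length ≤ n := le_trans (by rw [hdw]; exact List.length_dropWhile_le p rest) hrest
        rw [(T23 n dw hdwlen).1 (i + 1 + (tw.length : Int)) _ _ hne2 hlast2 hhd2]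
        rw [show wordsOfB (c :: (tw ++ dw)) i
              = (i, c :: tw) :: wordsOfB dw (i + ((c :: tw).length : Int)) by
            rw [wordsOfB]
            simp [hc, htw, hdw, hp, List.takeWhile_append_dropWhile]]
        show _ = outB _ ((stepB ([], [], none) (i, c :: tw)))
        simp only [stepB]
        have hlt : i < i + (((c :: tw).length : Nat) : Int) := by simp only [List.length_cons]; push_cast; omega
        rw [PySem.List.pyRange_one_cons hlt]
        have harith : i + 1 + (tw.length : Int) = i + ((c :: tw).length : Int) := by simp only [List.length_cons]; push_cast; omega
        rw [harith]
        simp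

-- ===== VERDICT (by name: the statement is the Claim_ definition above) =====
theorem normalize_with_offsets_py_spec : Claim_equal_normalize_with_offsets_py := by
  intro text _
  unfold Spec_normalize_with_offsets_py
  have h := Tinit text.toList.length text.toList le_rfl 0 false
  unfold finishA foldA outB at h
  unfold normalize_with_offsets_py normalize_with_offsets_py_alt
  simpa using h
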